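-- pv_equiv track=rewrite | github.com/EladEladFixler46/R2G-Empirical-Evaluation | src/r2g_eval/data.py | _joinable_counter
-- ===== SOURCE A (Python) =====
-- def _joinable(row_a: dict[str, str], row_b: dict[str, str]) -> bool:
--     for attr, value in row_a.items():
--         if row_b.get(attr) == value:
--             return True
--     return False
--
-- def _joinable_counter(rows: list[dict[str, str]], idx: int) -> int:
--     target = rows[idx]
--     total = 0
--     for j, other in enumerate(rows):
--         if j == idx:
--             continue
--         if _joinable(target, other):
--             total += 1
--     return total
-- ===== SOURCE B (Python) =====
-- def _joinable_counter(rows: list[dict[str, str]], idx: int) -> int: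
--     # Inverted index: group row indices by (attr, value) pair, then union over the target's pairs.
--     index: dict[tuple[str, str], list[int]] = {}
--     for j, row in enumerate(rows):
--         for attr, value in row.items():
--             index.setdefault((attr, value), []).append(j)
--     matched: set[int] = set()
--     for attr, value in rows[idx].items():
--         matched.update(index.get((attr, value), []))
--     matched.discard(idx)
--     return len(matched)
-- ===== Notes on version B (the rewrite author's own statement) =====
-- stated objective: alternative
-- what changed: Replaces the per-row scan with early-exit _joinable calls by an inverted index grouping row indices by (attr, value) pair, then taking the union of the buckets of the target row's pairs and discarding idx.
import Mathlib
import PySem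

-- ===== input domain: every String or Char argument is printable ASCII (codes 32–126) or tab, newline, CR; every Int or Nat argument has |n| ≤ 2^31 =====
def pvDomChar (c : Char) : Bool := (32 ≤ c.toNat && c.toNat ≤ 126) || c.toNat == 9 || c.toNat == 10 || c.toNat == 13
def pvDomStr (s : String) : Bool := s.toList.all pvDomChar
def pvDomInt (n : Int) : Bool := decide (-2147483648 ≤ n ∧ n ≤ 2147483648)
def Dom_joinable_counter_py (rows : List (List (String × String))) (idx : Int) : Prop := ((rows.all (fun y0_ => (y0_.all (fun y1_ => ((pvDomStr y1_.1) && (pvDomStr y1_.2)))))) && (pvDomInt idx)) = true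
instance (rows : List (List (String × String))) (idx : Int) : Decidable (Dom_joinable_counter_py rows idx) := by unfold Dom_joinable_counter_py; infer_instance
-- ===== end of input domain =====

-- B replaces A's per-row comparison loop by an inverted index (row indices grouped by
-- (attr, value) pair) whose buckets for the target's pairs are unioned; alternative, not faster.

-- ===== PORT A =====
-- _joinable(row_a, row_b): scan row_a's items, early-return on the first shared pair
def pvJoinable (ra rb : List (String × String)) : Bool :=
  match ra with
  | [] => false
  | (a, v) :: rest =>
    if (PySem.Dict.mk rb).get? a = some v then true else pvJoinable rest rb

def joinable_counter_py (rows : List (List (String × String))) (idx : Int) : Int :=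
  match PySem.List.pyGet? rows idx with
  | none => 0  -- rows[idx] raises IndexError; excluded by Pre_
  | some target =>
    (PySem.List.enumerate rows).foldl
      (fun total jo =>
        if jo.1 = idx then total
        else if pvJoinable target jo.2 then total + 1 else total) 0

-- ===== PORT B =====
def joinable_counter_py_alt (rows : List (List (String × String))) (idx : Int) : Int :=
  let index : PySem.Dict (String × String) (List Int) :=
    (PySem.List.enumerate rows).foldl
      (fun d jo => jo.2.foldl (fun d p => d.modify p [] (fun l => l ++ [jo.1])) d)
      PySem.Dict.empty
  match PySem.List.pyGet? rows idx with
  | none => 0  -- rows[idx] raises IndexError; excluded by Pre_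
  | some target =>
    let matched : PySem.Set Int :=
      target.foldl (fun s p => PySem.Set.update s (index.getD p [])) PySem.Set.empty
    PySem.Set.len (PySem.Set.discard matched idx)

-- ===== PRECONDITION & SPEC =====
-- Pre_ excludes out-of-range idx, where A raises IndexError, and rows whose association
-- list repeats a key, which represent no Python dict (rows are dict[str, str] in Python,
-- so the List ↔ dict encoding is meaningless there).
def Pre_joinable_counter_py (rows : List (List (String × String))) (idx : Int) : Prop :=
  PySem.Raise.InRange rows.length idx ∧ ∀ row ∈ rows, (row.map Prod.fst).Nodup
instance (rows : List (List (String × String))) (idx : Int) : Decidable (Pre_joinable_counter_py rows idx) := by unfold Pre_joinable_counter_py; infer_instance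

def pvWitness_joinable_counter_py : (List (List (String × String))) × Int :=
  ([[("a", "x"), ("b", "y")], [("a", "x")], [("b", "z")]], 0)

def Spec_joinable_counter_py (rows : List (List (String × String))) (idx : Int) (out : Int) : Prop := out = joinable_counter_py_alt rows idx
instance (rows : List (List (String × String))) (idx : Int) (out : Int) : Decidable (Spec_joinable_counter_py rows idx out) := by unfold Spec_joinable_counter_py; infer_instance

-- ===== CLAIM (what is proved, stated in full; the proofs are below) =====
def Claim_equal_joinable_counter_py : Prop := ∀ (rows : List (List (String × String))) (idx : Int), Dom_joinable_counter_py rows idx → Pre_joinable_counter_py rows idx → Spec_joinable_counter_py rows idx (joinable_counter_py rows idx)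

-- ===== LEMMAS AND PROOFS =====

-- A's counting loop is the length of a filter of the enumeration
theorem pv_count_foldl (l : List (Int × List (String × String))) (idx : Int)
    (t : List (String × String)) (n : Int) :
    l.foldl (fun total jo =>
        if jo.1 = idx then total
        else if pvJoinable t jo.2 then total + 1 else total) n
      = n + ((l.filter (fun jo => !(jo.1 == idx) && pvJoinable t jo.2)).length : Int) := by
  induction l generalizing n with
  | nil => simp
  | cons jo rest ih =>
    simp only [List.foldl_cons, List.filter_cons]
    by_cases h1 : jo.1 = idx
    · simp [h1, ih]
    · by_cases h2 : pvJoinable t jo.2 = true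
      · simp [h1, h2, ih]; omega
      · simp [h1, h2, ih]

theorem pvJoinable_iff (t rb : List (String × String)) :
    pvJoinable t rb = true ↔ ∃ p ∈ t, (PySem.Dict.mk rb).get? p.1 = some p.2 := by
  induction t with
  | nil => simp [pvJoinable]
  | cons q rest ih =>
    obtain ⟨a, v⟩ := q
    by_cases h : (PySem.Dict.mk rb).get? a = some v
    · simp [pvJoinable, h]
    · simp [pvJoinable, h, ih]

theorem pv_get?_iff_mem (rb : List (String × String)) (h : (rb.map Prod.fst).Nodup)
    (a v : String) : (PySem.Dict.mk rb).get? a = some v ↔ (a, v) ∈ rb := by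
  have := PySem.Dict.get?_eq_some_iff_mem_items (PySem.Dict.mk rb) a v
    (by simpa [PySem.Dict.keys_mk] using h)
  simpa using this

-- membership in Set.update
theorem pv_mem_update {s : PySem.Set Int} {xs : List Int} {j : Int} :
    j ∈ PySem.Set.update s xs ↔ j ∈ s ∨ j ∈ xs := by
  induction xs generalizing s with
  | nil => simp [PySem.Set.update]
  | cons x rest ih =>
    simp only [PySem.Set.update, List.foldl_cons]
    rw [show List.foldl PySem.Set.add (s.add x) rest = PySem.Set.update (s.add x) rest from rfl]
    rw [ih, PySem.Set.mem_add]
    simp [List.mem_cons]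
    tauto

theorem pv_mem_matched (t : List (String × String)) (g : String × String → List Int)
    (s : PySem.Set Int) (j : Int) :
    j ∈ t.foldl (fun s p => PySem.Set.update s (g p)) s ↔ j ∈ s ∨ ∃ p ∈ t, j ∈ g p := by
  induction t generalizing s with
  | nil => simp
  | cons p rest ih =>
    simp only [List.foldl_cons, ih, pv_mem_update]
    simp [List.mem_cons]
    tauto

theorem pv_nodup_matched (t : List (String × String)) (g : String × String → List Int)
    (s : PySem.Set Int) (h : s.Nodup) :
    (t.foldl (fun s p => PySem.Set.update s (g p)) s).Nodup := by
  induction t generalizing s with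
  | nil => simpa
  | cons p rest ih => exact ih _ (PySem.Set.nodup_update _ _ h)

-- the index bucket of pair p holds exactly the indices of rows containing p
theorem pv_index_getD (rows : List (List (String × String))) (p : String × String) :
    (((PySem.List.enumerate rows).foldl
        (fun d jo => jo.2.foldl (fun d q => d.modify q [] (fun l => l ++ [jo.1])) d)
        PySem.Dict.empty).getD p [])
      = (((PySem.List.enumerate rows).flatMap (fun jo => jo.2.map (fun q => (q, jo.1)))).filter
          (fun q => q.1 == p)).map (fun q => q.2) := by
  have hfold :
      ((PySem.List.enumerate rows).flatMap (fun jo => jo.2.map (fun q => (q, jo.1)))).foldl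
          (fun d q => d.modify q.1 [] (fun l => l ++ [q.2])) PySem.Dict.empty
        = (PySem.List.enumerate rows).foldl
            (fun d jo => jo.2.foldl (fun d q => d.modify q [] (fun l => l ++ [jo.1])) d)
            PySem.Dict.empty := by
    rw [List.foldl_flatMap]
    congr 1
    funext d jo
    rw [List.foldl_map]
  rw [← hfold, PySem.Dict.getD_foldl_modify_append]
  simp

theorem pv_mem_index (rows : List (List (String × String))) (p : String × String) (j : Int) :
    j ∈ (((PySem.List.enumerate rows).foldl
        (fun d jo => jo.2.foldl (fun d q => d.modify q [] (fun l => l ++ [jo.1])) d)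
        PySem.Dict.empty).getD p [])
      ↔ ∃ jo ∈ PySem.List.enumerate rows, p ∈ jo.2 ∧ j = jo.1 := by
  rw [pv_index_getD]
  simp only [List.mem_map, List.mem_filter, List.mem_flatMap, beq_iff_eq]
  constructor
  · rintro ⟨q, ⟨⟨jo, hjo, hq⟩, hq1⟩, hq2⟩
    obtain ⟨a, ha, rfl⟩ := hq
    simp only at hq1 hq2
    exact ⟨jo, hjo, hq1 ▸ ha, hq2.symm⟩
  · rintro ⟨jo, hjo, hp, rfl⟩
    exact ⟨(p, jo.1), ⟨⟨jo, hjo, p, hp, rfl⟩, rfl⟩, rfl⟩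

-- the first components of any filter of the enumeration are distinct
theorem pv_nodup_filter_enum (rows : List (List (String × String)))
    (f : Int × List (String × String) → Bool) :
    (((PySem.List.enumerate rows).filter f).map Prod.fst).Nodup := by
  have hsub : ((PySem.List.enumerate rows).filter f).Sublist (PySem.List.enumerate rows) :=
    List.filter_sublist
  have hpw : (((PySem.List.enumerate rows).filter f)).Pairwise (fun p q => p.1 < q.1) :=
    (PySem.List.pairwise_lt_enumerate rows 0).sublist hsub
  have : (((PySem.List.enumerate rows).filter f).map Prod.fst).Pairwise (· < ·) :=
    List.pairwise_map.2 hpw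
  exact this.imp ne_of_lt

-- ===== VERDICT (by name: the statement is the Claim_ definition above) =====
theorem joinable_counter_py_spec : Claim_equal_joinable_counter_py := by
  intro rows idx _hdom hpre
  obtain ⟨hin, hnodup⟩ := hpre
  unfold Spec_joinable_counter_py joinable_counter_py joinable_counter_py_alt
  obtain ⟨target, hget⟩ : ∃ t, PySem.List.pyGet? rows idx = some t := by
    cases h : PySem.List.pyGet? rows idx with
    | none => exact absurd hin (PySem.List.pyGet?_eq_none_iff rows idx |>.1 h)
    | some t => exact ⟨t, rfl⟩
  rw [hget]
  simp only
  rw [pv_count_foldl]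
  set E := PySem.List.enumerate rows with hE
  set F := E.filter (fun jo => !(jo.1 == idx) && pvJoinable target jo.2) with hF
  set idxD := E.foldl
      (fun d jo => jo.2.foldl (fun d q => d.modify q [] (fun l => l ++ [jo.1])) d)
      PySem.Dict.empty with hidxD
  set matched := target.foldl (fun s p => PySem.Set.update s (idxD.getD p [])) PySem.Set.empty
    with hmatched
  -- the final set and the filtered index list have the same (distinct) members
  have hmemM : ∀ j, j ∈ matched ↔ ∃ p ∈ target, ∃ jo ∈ E, p ∈ jo.2 ∧ j = jo.1 := by
    intro j
    rw [hmatched, pv_mem_matched]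
    simp only [PySem.Set.empty, List.not_mem_nil, false_or]
    constructor
    · rintro ⟨p, hp, hj⟩
      exact ⟨p, hp, (pv_mem_index rows p j).1 hj⟩
    · rintro ⟨p, hp, hj⟩
      exact ⟨p, hp, (pv_mem_index rows p j).2 hj⟩
  have hjoin : ∀ jo ∈ E, (pvJoinable target jo.2 = true ↔ ∃ p ∈ target, p ∈ jo.2) := by
    intro jo hjo
    have hrow : jo.2 ∈ rows := by
      rw [hE, PySem.List.mem_enumerate_iff] at hjo
      obtain ⟨k, hk, rfl⟩ := hjo
      exact List.getElem_mem hk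
    rw [pvJoinable_iff]
    constructor
    · rintro ⟨p, hp, hpg⟩
      exact ⟨p, hp, (pv_get?_iff_mem jo.2 (hnodup _ hrow) p.1 p.2).1 (by simpa using hpg)⟩
    · rintro ⟨p, hp, hpm⟩
      exact ⟨p, hp, (pv_get?_iff_mem jo.2 (hnodup _ hrow) p.1 p.2).2 (by simpa using hpm)⟩
  have hn1 := pv_nodup_filter_enum rows (fun jo => !(jo.1 == idx) && pvJoinable target jo.2)
  have hn2 : (PySem.Set.discard matched idx).Nodup :=
    List.Nodup.filter _ (pv_nodup_matched target _ PySem.Set.empty (by simp [PySem.Set.empty]))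
  have hperm : (F.map Prod.fst).Perm (PySem.Set.discard matched idx) := by
    refine (List.perm_ext_iff_of_nodup hn1 hn2).2 ?_
    intro j
    simp only [PySem.Set.discard, List.mem_filter, List.mem_map]
    constructor
    · rintro ⟨jo, ⟨hjoE, hcond⟩, rfl⟩
      simp only [Bool.and_eq_true, Bool.not_eq_true', beq_eq_false_iff_ne] at hcond
      obtain ⟨hne, hjoin'⟩ := hcond
      refine ⟨(hmemM jo.1).2 ?_, by simpa using hne⟩
      obtain ⟨p, hp, hpm⟩ := (hjoin jo hjoE).1 hjoin'
      exact ⟨p, hp, jo, hjoE, hpm, rfl⟩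
    · rintro ⟨hjm, hne⟩
      have hne' : j ≠ idx := by simpa using hne
      obtain ⟨p, hp, jo, hjoE, hpm, rfl⟩ := (hmemM j).1 hjm
      refine ⟨jo, ⟨hjoE, ?_⟩, rfl⟩
      simp only [Bool.and_eq_true, Bool.not_eq_true', beq_eq_false_iff_ne]
      exact ⟨by simpa using hne', (hjoin jo hjoE).2 ⟨p, hp, hpm⟩⟩
  have hlen : (F.length : Int) = ((PySem.Set.discard matched idx).length : Int) := by
    have h := hperm.length_eq
    simp only [List.length_map] at h
    exact_mod_cast h
  simp only [PySem.Set.len, hlen]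
  omega
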